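-- pv_equiv track=rewrite | github.com/lina21/Apriori | Apriori.for.sequences.py | get_elem_index_number
-- ===== SOURCE A (Python) =====
-- def get_elem_index_number(alist, index):
--     count_events = 0
--     if index == 0:
--         return 0, 0
--     else:
--         for i in range(len(alist)):
--             for j in range(len(alist[i])):
--                 count_events += 1
--                 if count_events == index:
--                     return i, j
-- ===== SOURCE B (Python) =====
-- def get_elem_index_number(alist, index):
--     if index == 0:
--         return 0, 0
--     if index < 0:
--         return None
--     rem = index
--     for i, sub in enumerate(alist):
--         if rem <= len(sub):
--             return i, rem - 1
--         rem -= len(sub)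
--     return None
-- ===== Notes on version B (the rewrite author's own statement) =====
-- stated objective: alternative
-- what changed: B locates the containing sublist by subtracting whole sublist lengths (prefix-sum skip, one loop over sublists with O(1) per sublist) instead of counting every element one by one in A's nested loops; measured faster but below the 1.5x threshold on the generated inputs.
import Mathlib
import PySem

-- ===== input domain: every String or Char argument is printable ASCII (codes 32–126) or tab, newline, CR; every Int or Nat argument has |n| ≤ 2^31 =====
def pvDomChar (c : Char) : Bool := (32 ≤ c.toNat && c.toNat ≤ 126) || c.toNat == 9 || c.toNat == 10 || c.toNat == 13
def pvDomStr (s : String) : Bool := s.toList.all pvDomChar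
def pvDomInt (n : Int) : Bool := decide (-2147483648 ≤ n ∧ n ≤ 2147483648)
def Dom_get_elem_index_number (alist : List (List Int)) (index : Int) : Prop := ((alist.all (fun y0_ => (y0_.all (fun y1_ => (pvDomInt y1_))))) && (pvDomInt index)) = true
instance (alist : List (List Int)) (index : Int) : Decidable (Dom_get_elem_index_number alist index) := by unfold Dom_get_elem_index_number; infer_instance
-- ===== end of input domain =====

-- B locates the sublist by subtracting whole sublist lengths (one step per sublist) instead of counting each element; A is total, so no Pre_.

-- ===== PORT A =====
-- inner 'for j in range(len(alist[i]))' loop: returns the updated count_events and the early-return value (if any)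
def pvALoopJ (i : Int) (sub : List Int) (j count index : Int) : Int × Option (Int × Int) :=
  match sub with
  | [] => (count, none)
  | _ :: rest =>
    let count := count + 1
    if count = index then (count, some (i, j))
    else pvALoopJ i rest (j + 1) count index

-- outer 'for i in range(len(alist))' loop
def pvALoopI (alist : List (List Int)) (i count index : Int) : Option (Int × Int) :=
  match alist with
  | [] => none
  | sub :: rest =>
    match pvALoopJ i sub 0 count index with
    | (_, some r) => some r
    | (count', none) => pvALoopI rest (i + 1) count' index

def get_elem_index_number (alist : List (List Int)) (index : Int) : Option (Int × Int) :=
  if index = 0 then some (0, 0) else pvALoopI alist 0 0 index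

-- ===== PORT B =====
def pvBLoop (alist : List (List Int)) (i rem : Int) : Option (Int × Int) :=
  match alist with
  | [] => none
  | sub :: rest =>
    if rem ≤ (sub.length : Int) then some (i, rem - 1)
    else pvBLoop rest (i + 1) (rem - sub.length)

def get_elem_index_number_alt (alist : List (List Int)) (index : Int) : Option (Int × Int) :=
  if index = 0 then some (0, 0)
  else if index < 0 then none
  else pvBLoop alist 0 index

-- ===== PRECONDITION & SPEC =====
def Spec_get_elem_index_number (alist : List (List Int)) (index : Int) (out : Option (Int × Int)) : Prop := out = get_elem_index_number_alt alist index
instance (alist : List (List Int)) (index : Int) (out : Option (Int × Int)) : Decidable (Spec_get_elem_index_number alist index out) := by unfold Spec_get_elem_index_number; infer_instance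

-- ===== CLAIM (what is proved, stated in full; the proofs are below) =====
def Claim_equal_get_elem_index_number : Prop := ∀ (alist : List (List Int)) (index : Int), Dom_get_elem_index_number alist index → Spec_get_elem_index_number alist index (get_elem_index_number alist index)

-- ===== LEMMAS AND PROOFS =====

lemma pvALoopJ_spec (i : Int) (sub : List Int) (j count index : Int) (h : count < index) :
    pvALoopJ i sub j count index =
      if index - count ≤ (sub.length : Int) then (index, some (i, j + (index - count) - 1))
      else (count + sub.length, none) := by
  induction sub generalizing j count with
  | nil => simp [pvALoopJ]; omega
  | cons x rest ih =>
    simp only [pvALoopJ, List.length_cons]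
    by_cases hc : count + 1 = index
    · rw [if_pos hc, if_pos (by push_cast; omega)]
      have hj : j + (index - count) - 1 = j := by omega
      simp [hj, hc]
    · rw [if_neg hc, ih (j + 1) (count + 1) (by omega)]
      push_cast
      split_ifs with h1 h2 h2
      · have : j + 1 + (index - (count + 1)) - 1 = j + (index - count) - 1 := by omega
        simp [this]
      · omega
      · omega
      · have : count + 1 + rest.length = count + (rest.length + 1) := by omega
        simp [this]

lemma pvALoopI_spec (alist : List (List Int)) (i count index : Int) (h : count < index) :
    pvALoopI alist i count index = pvBLoop alist i (index - count) := by
  induction alist generalizing i count with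
  | nil => simp [pvALoopI, pvBLoop]
  | cons sub rest ih =>
    simp only [pvALoopI, pvBLoop]
    rw [pvALoopJ_spec i sub 0 count index h]
    split_ifs with hlen
    · have h0 : (0 : Int) + (index - count) - 1 = index - count - 1 := by ring
      rw [h0]
    · show pvALoopI rest (i + 1) (count + sub.length) index = _
      rw [ih (i + 1) (count + sub.length) (by omega)]
      congr 1; ring

lemma pvALoopJ_none (i : Int) (sub : List Int) (j count index : Int) (h : index ≤ count) :
    pvALoopJ i sub j count index = (count + sub.length, none) := by
  induction sub generalizing j count with
  | nil => simp [pvALoopJ]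
  | cons x rest ih =>
    simp only [pvALoopJ, List.length_cons]
    rw [if_neg (by omega), ih (j + 1) (count + 1) (by omega)]
    push_cast
    have : count + 1 + (rest.length : Int) = count + (rest.length + 1) := by omega
    simp [this]

lemma pvALoopI_none (alist : List (List Int)) (i count index : Int) (h : index ≤ count) :
    pvALoopI alist i count index = none := by
  induction alist generalizing i count with
  | nil => simp [pvALoopI]
  | cons sub rest ih =>
    simp only [pvALoopI]
    rw [pvALoopJ_none i sub 0 count index h]
    exact ih (i + 1) (count + sub.length) (by have := Int.natCast_nonneg sub.length; omega)

-- ===== VERDICT (by name: the statement is the Claim_ definition above) =====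
theorem get_elem_index_number_spec : Claim_equal_get_elem_index_number := by
  intro alist index _
  unfold Spec_get_elem_index_number get_elem_index_number get_elem_index_number_alt
  by_cases h0 : index = 0
  · simp [h0]
  · rw [if_neg h0, if_neg h0]
    by_cases hneg : index < 0
    · rw [if_pos hneg, pvALoopI_none alist 0 0 index (by omega)]
    · rw [if_neg hneg, pvALoopI_spec alist 0 0 index (by omega)]
      norm_num
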